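-- pv_equiv track=rewrite | github.com/theot865-hub/ai-assistant-v2 | web/capabilities.py | get_output_paths_for_workers
-- ===== SOURCE A (Python) =====
-- from typing import Any
--
-- CAPABILITY_MANIFEST: dict[str, dict[str, Any]] = {
--     "leads": {
--         "what_it_does": "Builds the core realtor lead CSV using local pipeline sources.",
--         "required_inputs": ["No command args required."],
--         "outputs": ["workspace/leads/all_realtor_leads.csv"],
--         "limitations": ["Focused on realtor lead flow, not arbitrary industries."],
--         "examples": ["run leads", "generate realtor leads"],
--     },
--     "research": {
--         "what_it_does": "Runs web research for a query and writes a short result summary.",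
--         "required_inputs": ["A text query."],
--         "outputs": ["workspace/jobs/latest_research.txt"],
--         "limitations": ["Uses top web results only; not deep crawling."],
--         "examples": ["research victoria roofing market", "research local competitors"],
--     },
--     "outreach": {
--         "what_it_does": "Drafts realtor outreach messages from existing realtor leads.",
--         "required_inputs": ["Optional input CSV path; defaults to realtor leads CSV."],
--         "outputs": ["workspace/leads/all_realtor_outreach.csv"],
--         "limitations": ["Drafts messages only; does not send emails."],
--         "examples": ["run outreach", "draft outreach for realtor leads"],
--     },
--     "enrichment": {
--         "what_it_does": "Extracts website/email/phone from existing realtor lead profile pages.",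
--         "required_inputs": ["Optional input CSV path; defaults to realtor leads CSV."],
--         "outputs": ["workspace/leads/all_realtor_leads_enriched.csv"],
--         "limitations": ["Only parses publicly reachable pages; fields may remain blank."],
--         "examples": ["run enrichment", "enrich realtor leads"],
--     },
--     "pipeline": {
--         "what_it_does": "Runs business discovery, enrichment, and outreach drafting in sequence.",
--         "required_inputs": ["Optional business query (used by discovery stage)."],
--         "outputs": [
--             "workspace/leads/business_discovery.csv",
--             "workspace/leads/business_discovery_enriched.csv",
--             "workspace/leads/business_discovery_outreach.csv",
--         ],
--         "limitations": ["Uses the current local business worker sequence and defaults."],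
--         "examples": ["run pipeline", "run pipeline for victoria businesses"],
--     },
--     "business_discovery": {
--         "what_it_does": "Finds businesses from web search and stores title/url/snippet rows.",
--         "required_inputs": ["A business discovery query (niche + location)."],
--         "outputs": ["workspace/leads/business_discovery.csv"],
--         "limitations": ["Discovery quality depends on search result quality."],
--         "examples": ["find roofing companies in victoria", "find local plumbing businesses"],
--     },
--     "business_enrichment": {
--         "what_it_does": "Visits discovered business URLs and extracts domain/email/phone when available.",
--         "required_inputs": ["Optional input CSV path; defaults to business discovery CSV."],
--         "outputs": ["workspace/leads/business_discovery_enriched.csv"],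
--         "limitations": [
--             "No login/paywall bypass.",
--             "No guarantee every site exposes contact details.",
--         ],
--         "examples": [
--             "find roofing companies and get contact info",
--             "run business enrichment",
--         ],
--     },
--     "business_outreach": {
--         "what_it_does": "Generates outreach draft messages for enriched business leads.",
--         "required_inputs": ["Optional input CSV path; defaults to enriched business CSV."],
--         "outputs": ["workspace/leads/business_discovery_outreach.csv"],
--         "limitations": ["Creates drafts only; does not send email or book meetings."],
--         "examples": ["draft outreach for discovered businesses", "run business outreach"],
--     },
-- }
--
-- def get_output_paths_for_workers(workers: list[str]) -> list[str]:
--     paths: list[str] = []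
--     for worker in workers:
--         details = CAPABILITY_MANIFEST.get(worker, {})
--         for output in details.get("outputs", []):
--             if output not in paths:
--                 paths.append(output)
--     return paths
-- ===== SOURCE B (Python) =====
-- from typing import Any
--
-- CAPABILITY_MANIFEST: dict[str, dict[str, Any]] = {
--     "leads": {"outputs": ["workspace/leads/all_realtor_leads.csv"]},
--     "research": {"outputs": ["workspace/jobs/latest_research.txt"]},
--     "outreach": {"outputs": ["workspace/leads/all_realtor_outreach.csv"]},
--     "enrichment": {"outputs": ["workspace/leads/all_realtor_leads_enriched.csv"]},
--     "pipeline": {"outputs": [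
--         "workspace/leads/business_discovery.csv",
--         "workspace/leads/business_discovery_enriched.csv",
--         "workspace/leads/business_discovery_outreach.csv",
--     ]},
--     "business_discovery": {"outputs": ["workspace/leads/business_discovery.csv"]},
--     "business_enrichment": {"outputs": ["workspace/leads/business_discovery_enriched.csv"]},
--     "business_outreach": {"outputs": ["workspace/leads/business_discovery_outreach.csv"]},
-- }
--
-- def get_output_paths_for_workers(workers: list[str]) -> list[str]:
--     # Right fold: walk the workers back to front, merging each worker's
--     # (locally deduplicated) output list in front of the result built so far
--     # and dropping from that result whatever the new head already provides.
--     result: list[str] = []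
--     for worker in reversed(workers):
--         head = list(dict.fromkeys(CAPABILITY_MANIFEST.get(worker, {}).get("outputs", [])))
--         result = head + [p for p in result if p not in head]
--     return result
-- ===== Notes on version B (the rewrite author's own statement) =====
-- stated objective: alternative
-- what changed: Replaces A's forward scan with a global accumulator and per-output membership test by a right fold: workers are processed in reverse and each worker's output list is merged in front of the partial result, filtering out of that result the paths the new head already provides; no global seen structure is kept.
import Mathlib
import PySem

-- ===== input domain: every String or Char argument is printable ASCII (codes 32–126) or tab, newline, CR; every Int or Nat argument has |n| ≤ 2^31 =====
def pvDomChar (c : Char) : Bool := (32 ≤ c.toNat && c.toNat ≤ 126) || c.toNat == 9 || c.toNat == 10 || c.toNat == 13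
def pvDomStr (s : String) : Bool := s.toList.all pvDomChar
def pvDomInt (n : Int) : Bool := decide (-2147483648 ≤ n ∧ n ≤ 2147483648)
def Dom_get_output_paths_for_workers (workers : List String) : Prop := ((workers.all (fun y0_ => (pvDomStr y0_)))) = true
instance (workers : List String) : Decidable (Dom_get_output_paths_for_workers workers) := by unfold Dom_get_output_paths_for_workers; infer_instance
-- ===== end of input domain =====

-- B processes the workers in REVERSE as a right fold, merging each worker's output list
-- in front of the partial result and filtering that result against the new head;
-- no global seen accumulator. Objective: alternative (same cost, different structure).

-- the manifest's "outputs" lists, shared constant data of both programs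
def pvOutputs (worker : String) : List String :=
  if worker = "leads" then ["workspace/leads/all_realtor_leads.csv"]
  else if worker = "research" then ["workspace/jobs/latest_research.txt"]
  else if worker = "outreach" then ["workspace/leads/all_realtor_outreach.csv"]
  else if worker = "enrichment" then ["workspace/leads/all_realtor_leads_enriched.csv"]
  else if worker = "pipeline" then
    ["workspace/leads/business_discovery.csv",
     "workspace/leads/business_discovery_enriched.csv",
     "workspace/leads/business_discovery_outreach.csv"]
  else if worker = "business_discovery" then ["workspace/leads/business_discovery.csv"]
  else if worker = "business_enrichment" then ["workspace/leads/business_discovery_enriched.csv"]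
  else if worker = "business_outreach" then ["workspace/leads/business_discovery_outreach.csv"]
  else []

-- ===== PORT A =====
-- A: accumulate paths, appending each output only if not already present
def get_output_paths_for_workers (workers : List String) : List String :=
  workers.foldl
    (fun paths worker =>
      (pvOutputs worker).foldl
        (fun paths output => if paths.contains output then paths else paths ++ [output])
        paths)
    []

-- ===== PORT B =====
-- dict.fromkeys: first-occurrence dedup of a list
def pvFromkeys (seen : List String) : List String → List String
  | [] => []
  | x :: xs => if seen.contains x then pvFromkeys seen xs
               else x :: pvFromkeys (seen ++ [x]) xs

-- B: loop over reversed(workers), result := head ++ [p for p in result if p not in head]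
def get_output_paths_for_workers_alt (workers : List String) : List String :=
  workers.reverse.foldl
    (fun result worker =>
      let head := pvFromkeys [] (pvOutputs worker)
      head ++ result.filter (fun p => !head.contains p))
    []

-- ===== PRECONDITION & SPEC =====
def Spec_get_output_paths_for_workers (workers : List String) (out : List String) : Prop := out = get_output_paths_for_workers_alt workers
instance (workers : List String) (out : List String) : Decidable (Spec_get_output_paths_for_workers workers out) := by unfold Spec_get_output_paths_for_workers; infer_instance

-- ===== CLAIM (what is proved, stated in full; the proofs are below) =====
def Claim_equal_get_output_paths_for_workers : Prop := ∀ (workers : List String), Dom_get_output_paths_for_workers workers → Spec_get_output_paths_for_workers workers (get_output_paths_for_workers workers)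

-- ===== LEMMAS AND PROOFS =====

-- A's inner conditional-append step
def pvStep (paths : List String) (output : String) : List String :=
  if paths.contains output then paths else paths ++ [output]

-- A's nested fold is a single fold of pvStep over the flattened output list
theorem pvA_eq_foldl_flatMap (workers : List String) (acc : List String) :
    workers.foldl (fun paths worker => (pvOutputs worker).foldl pvStep paths) acc
      = (workers.flatMap pvOutputs).foldl pvStep acc := by
  induction workers generalizing acc with
  | nil => rfl
  | cons w ws ih => simp [List.flatMap_cons, List.foldl_append, ih]

-- folding pvStep with accumulator acc appends exactly the first-occurrence dedup with seen = acc
theorem pvFoldl_step_eq (xs : List String) (acc : List String) :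
    xs.foldl pvStep acc = acc ++ pvFromkeys acc xs := by
  induction xs generalizing acc with
  | nil => simp [pvFromkeys]
  | cons x xs ih =>
    by_cases h : x ∈ acc
    · simp [List.foldl_cons, pvStep, pvFromkeys, h, ih]
    · simp only [List.foldl_cons, pvStep, pvFromkeys, List.contains_eq_mem, h,
        decide_false, Bool.false_eq_true, if_false, ih (acc ++ [x])]
      simp

-- pvFromkeys depends on the seen list only through membership
theorem pvFromkeys_congr (ys : List String) (s s' : List String)
    (h : ∀ x, x ∈ s ↔ x ∈ s') : pvFromkeys s ys = pvFromkeys s' ys := by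
  induction ys generalizing s s' with
  | nil => rfl
  | cons y ys ih =>
    by_cases hy : y ∈ s
    · simp [pvFromkeys, hy, (h y).mp hy, ih s s' h]
    · have hy' : y ∉ s' := fun c => hy ((h y).mpr c)
      simp only [pvFromkeys, List.contains_eq_mem, hy, hy', decide_false,
        Bool.false_eq_true, if_false]
      exact congrArg _ (ih _ _ (by intro x; simp [h x]))

-- seen split: pvFromkeys (s ++ t) = filter-out-s of pvFromkeys t
theorem pvFromkeys_seen_append (ys : List String) (s t : List String) :
    pvFromkeys (s ++ t) ys = (pvFromkeys t ys).filter (fun x => !s.contains x) := by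
  induction ys generalizing t with
  | nil => rfl
  | cons y ys ih =>
    simp only [List.contains_eq_mem] at ih
    by_cases ht : y ∈ t
    · simp [pvFromkeys, ht, ih t]
    · by_cases hs : y ∈ s
      · have : y ∈ s ++ t := List.mem_append.mpr (Or.inl hs)
        simp only [pvFromkeys, List.contains_eq_mem, this, ht, decide_true, if_true,
          decide_false, Bool.false_eq_true, if_false, List.filter_cons]
        simp only [List.contains_eq_mem, hs, decide_true, Bool.not_true,
          Bool.false_eq_true, if_false]
        rw [← ih (t ++ [y]),
          pvFromkeys_congr ys (s ++ (t ++ [y])) (s ++ t) (by intro x; simp; aesop)]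
      · have : y ∉ s ++ t := by simp [hs, ht]
        simp only [pvFromkeys, List.contains_eq_mem, this, ht, decide_false,
          Bool.false_eq_true, if_false, List.filter_cons]
        simp only [List.contains_eq_mem, hs, decide_false, Bool.not_false, if_true]
        rw [← ih (t ++ [y]),
          pvFromkeys_congr ys (s ++ t ++ [y]) (s ++ (t ++ [y])) (by intro x; simp)]

-- list split: dedup of xs ++ ys processes ys with the emitted prefix added to seen
theorem pvFromkeys_append (xs ys s : List String) :
    pvFromkeys s (xs ++ ys) = pvFromkeys s xs ++ pvFromkeys (s ++ pvFromkeys s xs) ys := by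
  induction xs generalizing s with
  | nil =>
    simp [pvFromkeys]
  | cons x xs ih =>
    by_cases h : x ∈ s
    · simp [pvFromkeys, h, ih s]
    · simp only [List.cons_append, pvFromkeys, List.contains_eq_mem, h, decide_false,
        Bool.false_eq_true, if_false, ih (s ++ [x]), List.cons_append, List.append_assoc]
      rfl

-- B equals the first-occurrence dedup of the flattened output list
theorem pvAlt_eq (workers : List String) :
    get_output_paths_for_workers_alt workers = pvFromkeys [] (workers.flatMap pvOutputs) := by
  unfold get_output_paths_for_workers_alt
  rw [List.foldl_reverse]
  induction workers with
  | nil => rfl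
  | cons w ws ih =>
    simp only [List.foldr_cons, List.flatMap_cons, ih]
    rw [pvFromkeys_append (pvOutputs w) (ws.flatMap pvOutputs) [], List.nil_append]
    congr 1
    have := pvFromkeys_seen_append (ws.flatMap pvOutputs) (pvFromkeys [] (pvOutputs w)) []
    simpa using this.symm

-- ===== VERDICT (by name: the statement is the Claim_ definition above) =====
theorem get_output_paths_for_workers_spec : Claim_equal_get_output_paths_for_workers := by
  intro workers _
  show get_output_paths_for_workers workers = get_output_paths_for_workers_alt workers
  unfold get_output_paths_for_workers
  rw [show (fun paths worker => (pvOutputs worker).foldl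
        (fun paths output => if paths.contains output then paths else paths ++ [output]) paths)
      = (fun paths worker => (pvOutputs worker).foldl pvStep paths) from rfl,
    pvA_eq_foldl_flatMap, pvFoldl_step_eq, pvAlt_eq]
  simp
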